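-- pv_equiv track=rewrite | github.com/yuri-spizhovyi-mit/ET6-Programming-With-Python | mit_6002x/unit_1/gen_power_knap_2.py | yieldAllCombos
-- ===== SOURCE A (Python) =====
-- def yieldAllCombos(items):
--     n = len(items)
--     for i in range(3**n):
--         combo_1 = []
--         combo_2 = []
--         for j in range(n):
--             digit = (i // (3**j)) % 3
--             if digit == 1:
--                 combo_1.append(items[j])
--             elif digit == 2:
--                 combo_2.append(items[j])
--         yield combo_1, combo_2
-- ===== SOURCE B (Python) =====
-- def yieldAllCombos(items):
--     # recursive enumeration: reverse the list so the head is the slowest-varying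
--     # (most significant base-3 digit); item 0 ends up innermost and varies fastest
--     def rec(rev):
--         if not rev:
--             yield [], []
--             return
--         x = rev[0]
--         rest = rev[1:]
--         for d in (0, 1, 2):
--             for c1, c2 in rec(rest):
--                 if d == 0:
--                     yield c1, c2
--                 elif d == 1:
--                     yield c1 + [x], c2
--                 else:
--                     yield c1, c2 + [x]
--     yield from rec(items[::-1])
-- ===== Notes on version B (the rewrite author's own statement) =====
-- stated objective: alternative
-- what changed: Replaces the base-3 counter loop (decoding each i in range(3**n) digit by digit) with a recursive generator over the reversed item list that builds each of the three choices per item structurally, yielding the same assignments in the same order.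
import Mathlib
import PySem

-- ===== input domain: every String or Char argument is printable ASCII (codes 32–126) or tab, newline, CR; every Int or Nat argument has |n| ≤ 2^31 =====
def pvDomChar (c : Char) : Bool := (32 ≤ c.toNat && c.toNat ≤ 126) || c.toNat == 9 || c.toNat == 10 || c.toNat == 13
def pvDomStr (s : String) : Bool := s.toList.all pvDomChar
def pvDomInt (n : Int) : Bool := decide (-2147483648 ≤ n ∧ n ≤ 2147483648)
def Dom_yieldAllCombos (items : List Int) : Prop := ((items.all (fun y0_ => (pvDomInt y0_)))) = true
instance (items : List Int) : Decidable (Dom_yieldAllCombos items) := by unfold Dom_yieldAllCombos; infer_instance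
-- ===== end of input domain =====

-- B replaces A's base-3 counter decoding with a structurally recursive enumeration
-- over the reversed item list (alternative decomposition; same output, same order).

-- ===== PORT A =====
-- A: for i in range(3**n), decode i's base-3 digits to place each item.
-- j in range(n) is always a valid index, so items[j] is ported as pyGetD with default 0
-- (the default is never used); 3**j with j = ↑k nonnegative is ported as (3:Int)^j.toNat.
def yieldAllCombos (items : List Int) : List (List Int × List Int) :=
  let n := items.length
  (PySem.List.pyRange 0 ((3:Int)^n) 1).map (fun i =>
    (PySem.List.pyRange 0 (n:Int) 1).foldl (fun c j =>
      let digit := PySem.Int.mod (PySem.Int.floordiv i ((3:Int)^j.toNat)) 3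
      if digit = 1 then (c.1 ++ [PySem.List.pyGetD items j 0], c.2)
      else if digit = 2 then (c.1, c.2 ++ [PySem.List.pyGetD items j 0])
      else c) ([], []))

-- ===== PORT B =====
-- B's rec(rev): the head of the reversed list is the outermost (slowest-varying) choice.
def yacRec : List Int → List (List Int × List Int)
  | [] => [([], [])]
  | x :: rest =>
    ([0, 1, 2] : List Nat).flatMap (fun d =>
      (yacRec rest).map (fun p =>
        if d = 0 then p
        else if d = 1 then (p.1 ++ [x], p.2)
        else (p.1, p.2 ++ [x])))

def yieldAllCombos_alt (items : List Int) : List (List Int × List Int) :=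
  yacRec items.reverse

-- ===== PRECONDITION & SPEC =====
def Spec_yieldAllCombos (items : List Int) (out : List (List Int × List Int)) : Prop := out = yieldAllCombos_alt items
instance (items : List Int) (out : List (List Int × List Int)) : Decidable (Spec_yieldAllCombos items out) := by unfold Spec_yieldAllCombos; infer_instance

-- ===== CLAIM (what is proved, stated in full; the proofs are below) =====
def Claim_equal_yieldAllCombos : Prop := ∀ (items : List Int), Dom_yieldAllCombos items → Spec_yieldAllCombos items (yieldAllCombos items)

-- ===== LEMMAS AND PROOFS =====

-- Mathematical normal form of A's inner loop: decode m's base-3 digits front-to-back.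
def comboRec : List Int → Nat → List Int × List Int
  | [], _ => ([], [])
  | y :: rest, m =>
    let p := comboRec rest (m / 3)
    if m % 3 = 1 then (y :: p.1, p.2)
    else if m % 3 = 2 then (p.1, y :: p.2)
    else p

theorem inner_eq (items : List Int) (m : Nat) (c : List Int × List Int) :
    (List.range items.length).foldl
      (fun c k =>
        if (m / 3 ^ k) % 3 = 1 then (c.1 ++ [items.getD k 0], c.2)
        else if (m / 3 ^ k) % 3 = 2 then (c.1, c.2 ++ [items.getD k 0])
        else c) c
      = (c.1 ++ (comboRec items m).1, c.2 ++ (comboRec items m).2) := by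
  induction items generalizing m c with
  | nil => simp [comboRec]
  | cons y rest ih =>
    have hr : List.range (y :: rest).length = 0 :: (List.range rest.length).map Nat.succ := by
      simp [List.range_succ_eq_map]
    rw [hr]
    simp only [List.foldl_cons, List.foldl_map, Nat.succ_eq_add_one,
      List.getD_cons_succ, List.getD_cons_zero, pow_zero, Nat.div_one,
      pow_succ', ← Nat.div_div_eq_div_mul]
    rw [ih]
    simp only [comboRec]
    split_ifs <;> simp

theorem portA_inner (items : List Int) (m : Nat) :
    (PySem.List.pyRange 0 (items.length : Int) 1).foldl (fun c j =>
      let digit := PySem.Int.mod (PySem.Int.floordiv ((m : Nat) : Int) ((3:Int)^j.toNat)) 3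
      if digit = 1 then (c.1 ++ [PySem.List.pyGetD items j 0], c.2)
      else if digit = 2 then (c.1, c.2 ++ [PySem.List.pyGetD items j 0])
      else c) ([], []) = comboRec items m := by
  rw [PySem.List.pyRange_one]
  simp only [Int.sub_zero, Int.toNat_natCast, List.foldl_map, zero_add,
    Int.toNat_natCast, PySem.List.pyGetD_natCast,
    show (3:Int) = ((3:Nat):Int) from by norm_num, ← Nat.cast_pow,
    PySem.Int.floordiv_natCast, PySem.Int.mod_natCast,
    Nat.cast_eq_one, show (2:Int) = ((2:Nat):Int) from by norm_num, Nat.cast_inj]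
  rw [inner_eq]
  simp

theorem range_three_mul (M : Nat) (f : Nat → List Int × List Int) :
    (List.range (3 * M)).map f
      = (List.range M).flatMap (fun k => [f (3 * k), f (3 * k + 1), f (3 * k + 2)]) := by
  induction M with
  | zero => simp
  | succ M ih =>
    have h3 : 3 * (M + 1) = (3 * M + 1) + 1 + 1 := by ring
    rw [h3, List.range_succ, List.range_succ, List.range_succ, List.range_succ]
    simp [ih]

theorem yacRec_cons (x : Int) (l : List Int) :
    yacRec (x :: l)
      = yacRec l ++ ((yacRec l).map (fun p => (p.1 ++ [x], p.2))
          ++ (yacRec l).map (fun p => (p.1, p.2 ++ [x]))) := by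
  simp [yacRec, List.flatMap_cons]

theorem comm1 (L : List (List Int × List Int)) (x y : Int) :
    ((L.map (fun p => (p.1 ++ [x], p.2))).flatMap
        (fun p => [p, (y :: p.1, p.2), (p.1, y :: p.2)]))
      = (L.flatMap (fun p => [p, (y :: p.1, p.2), (p.1, y :: p.2)])).map
          (fun p => (p.1 ++ [x], p.2)) := by
  induction L with
  | nil => rfl
  | cons p L ih => simp [ih]

theorem comm2 (L : List (List Int × List Int)) (x y : Int) :
    ((L.map (fun p => (p.1, p.2 ++ [x]))).flatMap
        (fun p => [p, (y :: p.1, p.2), (p.1, y :: p.2)]))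
      = (L.flatMap (fun p => [p, (y :: p.1, p.2), (p.1, y :: p.2)])).map
          (fun p => (p.1, p.2 ++ [x])) := by
  induction L with
  | nil => rfl
  | cons p L ih => simp [ih]

theorem yacRec_snoc (l : List Int) (y : Int) :
    yacRec (l ++ [y])
      = (yacRec l).flatMap (fun p => [p, (y :: p.1, p.2), (p.1, y :: p.2)]) := by
  induction l with
  | nil => simp [yacRec]
  | cons x l ih =>
    rw [List.cons_append, yacRec_cons x (l ++ [y]), yacRec_cons x l, ih,
      List.flatMap_append, List.flatMap_append, comm1, comm2]

theorem main_eq (items : List Int) :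
    (List.range (3 ^ items.length)).map (comboRec items) = yacRec items.reverse := by
  induction items with
  | nil => simp [comboRec, yacRec]
  | cons y rest ih =>
    have hlen : (3:Nat) ^ (y :: rest).length = 3 * 3 ^ rest.length := by
      simp [pow_succ']
    rw [hlen, range_three_mul, List.reverse_cons, yacRec_snoc, ← ih,
      List.flatMap_map]
    have hfun : (fun k => [comboRec (y :: rest) (3 * k), comboRec (y :: rest) (3 * k + 1),
          comboRec (y :: rest) (3 * k + 2)])
        = (fun k => [comboRec rest k, (y :: (comboRec rest k).1, (comboRec rest k).2),
            ((comboRec rest k).1, y :: (comboRec rest k).2)]) := by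
      funext k
      have h0m : (3 * k) % 3 = 0 := by omega
      have h0d : (3 * k) / 3 = k := by omega
      have h1m : (3 * k + 1) % 3 = 1 := by omega
      have h1d : (3 * k + 1) / 3 = k := by omega
      have h2m : (3 * k + 2) % 3 = 2 := by omega
      have h2d : (3 * k + 2) / 3 = k := by omega
      simp [comboRec, h0m, h0d, h1m, h1d, h2m, h2d]
    rw [hfun]

-- ===== VERDICT (by name: the statement is the Claim_ definition above) =====
theorem yieldAllCombos_spec : Claim_equal_yieldAllCombos := by
  intro items _
  have hcast : (3:Int) ^ items.length = ((3 ^ items.length : Nat) : Int) := by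
    push_cast; ring
  show (PySem.List.pyRange 0 ((3:Int) ^ items.length) 1).map (fun i =>
      (PySem.List.pyRange 0 (items.length : Int) 1).foldl (fun c j =>
        let digit := PySem.Int.mod (PySem.Int.floordiv i ((3:Int)^j.toNat)) 3
        if digit = 1 then (c.1 ++ [PySem.List.pyGetD items j 0], c.2)
        else if digit = 2 then (c.1, c.2 ++ [PySem.List.pyGetD items j 0])
        else c) ([], [])) = yacRec items.reverse
  rw [hcast, PySem.List.pyRange_one 0 (((3 ^ items.length : Nat) : Int))]
  simp only [Int.sub_zero, Int.toNat_natCast, List.map_map]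
  rw [← main_eq items]
  refine List.map_congr_left ?_
  intro m _
  have h := portA_inner items m
  simp only [Function.comp_apply, zero_add]
  exact h
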